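-- pv_equiv track=rewrite | github.com/Jackenmen/label-doconly-changes | tests/utils.py | _read_test_file
-- ===== SOURCE A (Python) =====
-- from typing import Iterator
--
-- def _read_test_file(lines: Iterator[str]) -> tuple[str, str]:
--     after_found = False
--     before_lines = []
--     after_lines = []
--
--     for line in lines:
--         if not after_found:
--             if line.startswith("# --- AFTER"):
--                 after_found = True
--             else:
--                 before_lines.append(line)
--         else:
--             if line.startswith("# ==="):
--                 break
--             after_lines.append(line)
--     else:
--         if after_found:
--             raise RuntimeError("Did not find the end of AFTER section")
--         raise RuntimeError("Did not find the end of BEFORE section")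
--
--     # remove last new line to allow files not ending with an empty line
--     before_lines[-1] = before_lines[-1][:-1]
--     after_lines[-1] = after_lines[-1][:-1]
--
--     return "".join(before_lines), "".join(after_lines)
-- ===== SOURCE B (Python) =====
-- def _read_test_file(lines):
--     lines = iter(lines)
--     before_lines = []
--     for line in lines:
--         if line.startswith("# --- AFTER"):
--             break
--         before_lines.append(line)
--     else:
--         raise RuntimeError("Did not find the end of BEFORE section")
--
--     after_lines = []
--     for line in lines:
--         if line.startswith("# ==="):
--             break
--         after_lines.append(line)
--     else:
--         raise RuntimeError("Did not find the end of AFTER section")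
--
--     # remove last new line to allow files not ending with an empty line
--     before_lines[-1] = before_lines[-1][:-1]
--     after_lines[-1] = after_lines[-1][:-1]
--
--     return "".join(before_lines), "".join(after_lines)
-- ===== Notes on version B (the rewrite author's own statement) =====
-- stated objective: simpler
-- what changed: Replaces the single flag-driven loop with two sequential for-else loops over the same iterator: one collecting BEFORE up to the '# --- AFTER' marker, one collecting AFTER up to '# ===', removing the after_found state flag and the per-line flag test.
-- outside the precondition, e.g. on _read_test_file(['a\n', '# ===\n']): A raises RuntimeError, B raises RuntimeError; on _read_test_file(['# --- AFTER\n', 'b\n', '# ===\n']): A raises IndexError, B raises IndexError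
import Mathlib
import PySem

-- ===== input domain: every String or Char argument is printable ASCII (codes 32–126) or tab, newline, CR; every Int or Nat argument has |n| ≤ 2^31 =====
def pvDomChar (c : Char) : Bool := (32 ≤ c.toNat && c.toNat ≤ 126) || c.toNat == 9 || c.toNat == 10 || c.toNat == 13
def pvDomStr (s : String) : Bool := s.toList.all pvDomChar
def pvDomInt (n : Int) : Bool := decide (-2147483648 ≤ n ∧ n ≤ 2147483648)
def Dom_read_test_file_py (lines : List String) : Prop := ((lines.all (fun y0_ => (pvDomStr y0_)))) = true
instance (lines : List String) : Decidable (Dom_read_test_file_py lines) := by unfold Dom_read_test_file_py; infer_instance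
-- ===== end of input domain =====

-- B replaces A's after_found-flag loop with two sequential loops (find BEFORE, then AFTER);
-- objective: simpler. Equivalence is about the return value on Pre_ (where Python A returns).

-- ===== PORT A =====
-- A's single loop carrying the after_found flag and both accumulators;
-- none = the for-else RuntimeError path.
def pvLoopA : List String → Bool → List String → List String →
    Option (List String × List String)
  | [], _, _, _ => none
  | l :: ls, false, b, a =>
      if PySem.Str.startswith l "# --- AFTER" then pvLoopA ls true b a
      else pvLoopA ls false (b ++ [l]) a
  | l :: ls, true, b, a =>
      if PySem.Str.startswith l "# ===" then some (b, a)
      else pvLoopA ls true b (a ++ [l])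

def read_test_file_py (lines : List String) : String × String :=
  match pvLoopA lines false [] [] with
  | none => ("", "")  -- Python raises RuntimeError here; excluded by Pre_
  | some (b, a) =>
    match b.getLast?, a.getLast? with
    | some lb, some la =>
        (PySem.Str.join "" (b.dropLast ++ [PySem.Str.slice lb none (some (-1))]),
         PySem.Str.join "" (a.dropLast ++ [PySem.Str.slice la none (some (-1))]))
    | _, _ => ("", "")  -- Python raises IndexError on an empty section; excluded by Pre_

-- ===== PORT B =====
-- B's first loop: collect before_lines until the AFTER marker, returning the remaining lines.
def pvLoopB1 : List String → List String → Option (List String × List String)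
  | [], _ => none
  | l :: ls, acc =>
      if PySem.Str.startswith l "# --- AFTER" then some (acc, ls)
      else pvLoopB1 ls (acc ++ [l])

-- B's second loop: collect after_lines until the '# ===' terminator.
def pvLoopB2 : List String → List String → Option (List String)
  | [], _ => none
  | l :: ls, acc =>
      if PySem.Str.startswith l "# ===" then some acc
      else pvLoopB2 ls (acc ++ [l])

def read_test_file_py_alt (lines : List String) : String × String :=
  match pvLoopB1 lines [] with
  | some (before, rest) =>
    match pvLoopB2 rest [] with
    | some after =>
      match before.getLast? with
      | some lb =>
        match after.getLast? with
        | some la =>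
            (PySem.Str.join "" (before.dropLast ++ [PySem.Str.slice lb none (some (-1))]),
             PySem.Str.join "" (after.dropLast ++ [PySem.Str.slice la none (some (-1))]))
        | none => ("", "")  -- IndexError on an empty AFTER section; excluded by Pre_
      | none => ("", "")  -- IndexError on an empty BEFORE section; excluded by Pre_
    | none => ("", "")  -- RuntimeError (AFTER end not found); excluded by Pre_
  | none => ("", "")  -- RuntimeError (BEFORE end not found); excluded by Pre_

-- ===== PRECONDITION & SPEC =====
-- Pre_ excludes exactly the inputs where Python A raises: no '# --- AFTER' marker or no
-- following '# ===' line (RuntimeError), or an empty BEFORE or AFTER section (IndexError).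
def Pre_read_test_file_py (lines : List String) : Prop :=
  (lines.any (fun l => PySem.Str.startswith l "# --- AFTER")) = true ∧
  lines.takeWhile (fun l => !PySem.Str.startswith l "# --- AFTER") ≠ [] ∧
  ((lines.dropWhile (fun l => !PySem.Str.startswith l "# --- AFTER")).tail.any
      (fun l => PySem.Str.startswith l "# ===")) = true ∧
  (lines.dropWhile (fun l => !PySem.Str.startswith l "# --- AFTER")).tail.takeWhile
      (fun l => !PySem.Str.startswith l "# ===") ≠ []
instance (lines : List String) : Decidable (Pre_read_test_file_py lines) := by
  unfold Pre_read_test_file_py; infer_instance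

def pvWitness_read_test_file_py : List String :=
  ["before line\n", "# --- AFTER\n", "after line\n", "# === end\n"]

def Spec_read_test_file_py (lines : List String) (out : String × String) : Prop := out = read_test_file_py_alt lines
instance (lines : List String) (out : String × String) : Decidable (Spec_read_test_file_py lines out) := by unfold Spec_read_test_file_py; infer_instance

-- ===== CLAIM (what is proved, stated in full; the proofs are below) =====
def Claim_equal_read_test_file_py : Prop := ∀ (lines : List String), Dom_read_test_file_py lines → Pre_read_test_file_py lines → Spec_read_test_file_py lines (read_test_file_py lines)

-- ===== LEMMAS AND PROOFS =====

-- A's loop with the flag still false is B's first loop followed by A's loop with the flag set.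
lemma pvLoopA_false (lines : List String) : ∀ (b a : List String),
    pvLoopA lines false b a =
      match pvLoopB1 lines b with
      | none => none
      | some (bl, rest) => pvLoopA rest true bl a := by
  induction lines with
  | nil => intro b a; rfl
  | cons l ls ih =>
      intro b a
      simp only [pvLoopA, pvLoopB1]
      split <;> simp [ih]

-- A's loop with the flag set is B's second loop, paired with the finished before-list.
lemma pvLoopA_true (lines : List String) : ∀ (b a : List String),
    pvLoopA lines true b a = (pvLoopB2 lines a).map (fun al => (b, al)) := by
  induction lines with
  | nil => intro b a; rfl
  | cons l ls ih =>
      intro b a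
      simp only [pvLoopA, pvLoopB2]
      split <;> simp [ih]

-- ===== VERDICT (by name: the statement is the Claim_ definition above) =====
theorem read_test_file_py_spec : Claim_equal_read_test_file_py := by
  intro lines _ _
  unfold Spec_read_test_file_py read_test_file_py read_test_file_py_alt
  rw [pvLoopA_false]
  cases h1 : pvLoopB1 lines [] with
  | none => rfl
  | some p =>
      obtain ⟨bl, rest⟩ := p
      dsimp only
      rw [pvLoopA_true]
      cases h2 : pvLoopB2 rest [] with
      | none => rfl
      | some al =>
          dsimp only [Option.map]
          cases bl.getLast? <;> cases al.getLast? <;> rfl
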